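-- pv_equiv track=rewrite | github.com/MICKBOUT/python_module | module_03/ex3/ft_achievement_tracker.py | ultra_rare_achievement
-- ===== SOURCE A (Python) =====
-- def ultra_rare_achievement(player_achievements: list[str, set]) -> set:
--     """
--     return a set w/ only achivment obteine by one person
--     """
--     seen_once = set()
--     seen_many_time = set()
--
--     for _, achievements in player_achievements:
--         for achievement in achievements:
--             if achievement not in seen_many_time:
--                 if achievement in seen_once:
--                     seen_once.remove(achievement)
--                     seen_many_time.add(achievement)
--                 else:
--                     seen_once.add(achievement)
--     return seen_once
-- ===== SOURCE B (Python) =====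
-- def ultra_rare_achievement(player_achievements: list[str, set]) -> set:
--     """
--     return a set w/ only achievements obtained by one person
--     """
--     counts = {}
--     for _, achievements in player_achievements:
--         for achievement in achievements:
--             counts[achievement] = counts.get(achievement, 0) + 1
--     return {a for a, n in counts.items() if n == 1}
-- ===== Notes on version B (the rewrite author's own statement) =====
-- stated objective: idiomatic
-- what changed: Replaces the seen_once/seen_many two-set move-to-many branching with a single occurrence-count table built in one sweep plus a separate count==1 filtering pass.
import Mathlib
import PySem

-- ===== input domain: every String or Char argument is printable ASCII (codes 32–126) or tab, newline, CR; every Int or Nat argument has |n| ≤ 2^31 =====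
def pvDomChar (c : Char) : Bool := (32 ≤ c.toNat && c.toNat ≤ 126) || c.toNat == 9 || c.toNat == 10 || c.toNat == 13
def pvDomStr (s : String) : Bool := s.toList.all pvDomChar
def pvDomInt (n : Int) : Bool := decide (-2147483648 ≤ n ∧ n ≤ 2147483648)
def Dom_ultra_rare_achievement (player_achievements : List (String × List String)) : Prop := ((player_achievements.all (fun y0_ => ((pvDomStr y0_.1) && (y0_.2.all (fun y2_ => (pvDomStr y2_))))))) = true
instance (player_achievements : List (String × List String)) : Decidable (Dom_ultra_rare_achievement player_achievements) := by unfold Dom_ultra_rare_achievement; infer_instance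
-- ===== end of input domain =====

-- B replaces A's seen_once/seen_many two-set bookkeeping by an occurrence-count table
-- plus a count==1 filtering pass (idiomatic; same asymptotic cost).


-- ===== PORT A =====
-- the body of A's inner loop; Set.discard is exact for Python's .remove here because the
-- branch guarantees the element is in seen_once
def pvStepA (st : PySem.Set String × PySem.Set String) (achievement : String) :
    PySem.Set String × PySem.Set String :=
  if PySem.Set.contains st.2 achievement then st
  else if PySem.Set.contains st.1 achievement then
    (PySem.Set.discard st.1 achievement, PySem.Set.add st.2 achievement)
  else (PySem.Set.add st.1 achievement, st.2)

def ultra_rare_achievement (player_achievements : List (String × List String)) : List String :=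
  (player_achievements.foldl
    (fun st pa => pa.2.foldl pvStepA st)
    (PySem.Set.empty, PySem.Set.empty)).1

-- ===== PORT B =====
def ultra_rare_achievement_alt (player_achievements : List (String × List String)) : List String :=
  let counts : PySem.Dict String Int :=
    player_achievements.foldl
      (fun d pa => pa.2.foldl (fun d a => d.modify a 0 (· + 1)) d)
      PySem.Dict.empty
  ((counts.items.filter (fun p => p.2 == 1)).map (·.1))

-- ===== PRECONDITION & SPEC =====
def Spec_ultra_rare_achievement (player_achievements : List (String × List String)) (out : List String) : Prop := out = ultra_rare_achievement_alt player_achievements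
instance (player_achievements : List (String × List String)) (out : List String) : Decidable (Spec_ultra_rare_achievement player_achievements out) := by unfold Spec_ultra_rare_achievement; infer_instance

-- ===== CLAIM (what is proved, stated in full; the proofs are below) =====
def Claim_equal_ultra_rare_achievement : Prop := ∀ (player_achievements : List (String × List String)), Dom_ultra_rare_achievement player_achievements → Spec_ultra_rare_achievement player_achievements (ultra_rare_achievement player_achievements)

-- ===== LEMMAS AND PROOFS =====

-- A's fold over the flattened stream of achievement occurrences:
-- seen_once is the first-occurrence-ordered list of elements with total count 1, and
-- membership in seen_many is exactly "count ≥ 2".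
theorem pvA_inv (xs : List String) :
    (xs.foldl pvStepA (PySem.Set.empty, PySem.Set.empty)).1
      = (PySem.Set.ofList xs).filter (fun k => xs.count k == 1)
    ∧ ∀ k, PySem.Set.contains (xs.foldl pvStepA (PySem.Set.empty, PySem.Set.empty)).2 k
      = decide (2 ≤ xs.count k) := by
  induction xs using List.reverseRecOn with
  | nil =>
    constructor <;> simp [PySem.Set.empty, PySem.Set.ofList, PySem.Set.contains]
  | append_singleton xs a ih =>
    obtain ⟨ho, hm⟩ := ih
    have hm' : ∀ k, k ∈ (xs.foldl pvStepA (PySem.Set.empty, PySem.Set.empty)).2 ↔ 2 ≤ xs.count k := by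
      intro k; have := hm k; simpa using this
    simp only [List.foldl_append, List.foldl_cons, List.foldl_nil]
    set st := xs.foldl pvStepA (PySem.Set.empty, PySem.Set.empty) with hst
    have hof : PySem.Set.ofList (xs ++ [a]) = PySem.Set.add (PySem.Set.ofList xs) a := by
      simp [PySem.Set.ofList_eq_foldl, List.foldl_append]
    have hcnt : ∀ k, (xs ++ [a]).count k = xs.count k + (if k = a then 1 else 0) := by
      intro k
      simp [List.count_append, List.count_singleton', eq_comm]
    unfold pvStepA
    rw [hm a]
    by_cases h2 : 2 ≤ xs.count a
    · -- a already seen many times: nothing changes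
      have hax : a ∈ xs := List.count_pos_iff.mp (by omega)
      rw [if_pos (by simpa using h2)]
      refine ⟨?_, ?_⟩
      · rw [ho, hof]
        have : PySem.Set.add (PySem.Set.ofList xs) a = PySem.Set.ofList xs := by
          simp [PySem.Set.add, PySem.Set.mem_ofList, hax]
        rw [this]
        apply List.filter_congr
        intro k _
        rw [hcnt k]
        by_cases hk : k = a
        · subst hk
          simp only [beq_eq_decide]
          simp; omega
        · simp [hk]
      · intro k
        rw [hm k, hcnt k]
        by_cases hk : k = a
        · subst hk
          simp [h2]; omega
        · simp [hk]
    · rw [if_neg (by simpa using h2)]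
      by_cases h1 : xs.count a = 1
      · -- a seen exactly once so far: moved from seen_once to seen_many
        have hax : a ∈ xs := List.count_pos_iff.mp (by omega)
        have hone : PySem.Set.contains st.1 a = true := by
          rw [ho]
          simp [List.mem_filter, PySem.Set.mem_ofList, hax, h1]
        rw [if_pos hone]
        refine ⟨?_, ?_⟩
        · show PySem.Set.discard st.1 a = _
          rw [ho, hof]
          have : PySem.Set.add (PySem.Set.ofList xs) a = PySem.Set.ofList xs := by
            simp [PySem.Set.add, PySem.Set.mem_ofList, hax]
          rw [this]
          show List.filter _ (List.filter _ _) = _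
          rw [List.filter_filter]
          apply List.filter_congr
          intro k _
          rw [hcnt k]
          by_cases hk : k = a
          · subst hk; simp [h1]
          · simp [hk]
        · intro k
          show PySem.Set.contains (PySem.Set.add st.2 a) k = _
          have hst2 : PySem.Set.contains st.2 a = false := by rw [hm a]; simp; omega
          have : PySem.Set.add st.2 a = st.2 ++ [a] := by
            simp only [PySem.Set.add, hst2]; simp
          rw [this, hcnt k]
          by_cases hk : k = a
          · subst hk
            simp only [PySem.Set.contains] at *
            simp [h1]
          · simp only [PySem.Set.contains] at *
            simp [hk, hm' k]
      · -- a unseen so far: appended to seen_once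
        have hax : a ∉ xs := by
          intro hmem
          have := List.count_pos_iff.mpr hmem
          omega
        have hc0 : xs.count a = 0 := List.count_eq_zero.mpr hax
        have hone : PySem.Set.contains st.1 a = false := by
          rw [ho]
          simp only [PySem.Set.contains]
          simp [List.mem_filter, PySem.Set.mem_ofList, hax]
        rw [if_neg (by simpa using hone)]
        refine ⟨?_, ?_⟩
        · show PySem.Set.add st.1 a = _
          have hno : PySem.Set.add st.1 a = st.1 ++ [a] := by
            simp only [PySem.Set.add, hone]; simp
          have hno2 : PySem.Set.add (PySem.Set.ofList xs) a = PySem.Set.ofList xs ++ [a] := by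
            simp [PySem.Set.add, PySem.Set.mem_ofList, hax]
          rw [hno, hof, hno2, ho, List.filter_append]
          congr 1
          · apply List.filter_congr
            intro k hk
            have hkx : k ∈ xs := (PySem.Set.mem_ofList ..).mp hk
            have : k ≠ a := fun h => hax (h ▸ hkx)
            rw [hcnt k]; simp [this]
          · simp [hc0]
        · intro k
          rw [hm k, hcnt k]
          by_cases hk : k = a
          · subst hk; simp [hc0]
          · simp [hk]

-- ===== VERDICT (by name: the statement is the Claim_ definition above) =====
theorem ultra_rare_achievement_spec : Claim_equal_ultra_rare_achievement := by
  intro l _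
  unfold Spec_ultra_rare_achievement ultra_rare_achievement ultra_rare_achievement_alt
  rw [show (l.foldl (fun st pa => pa.2.foldl pvStepA st) (PySem.Set.empty, PySem.Set.empty))
      = ((l.flatMap (·.2)).foldl pvStepA (PySem.Set.empty, PySem.Set.empty)) from
      (List.foldl_flatMap).symm,
    (pvA_inv (l.flatMap (·.2))).1]
  rw [show (l.foldl (fun (d : PySem.Dict String Int) pa => pa.2.foldl (fun d a => d.modify a 0 (· + 1)) d) PySem.Dict.empty)
      = PySem.Dict.counter (l.flatMap (·.2)) from by
      rw [PySem.Dict.counter_eq_foldl, List.foldl_flatMap]]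
  simp only [PySem.Dict.items_counter, List.filter_map, List.map_map]
  simp only [Function.comp_def]
  rw [show (fun x : String => x) = id from rfl, List.map_id]
  apply List.filter_congr
  intro k _
  simp [Nat.cast_eq_one]
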